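-- pv_equiv track=rewrite | github.com/Kinetics20/Python_practice_sessions_05 | Unit_tests/codewars_functions_.py | dir_reduc
-- ===== SOURCE A (Python) =====
-- def dir_reduc(arr):
--     opposite = {'NORTH': 'SOUTH', 'SOUTH': 'NORTH', 'EAST': 'WEST', 'WEST': 'EAST'}
--     stack = []
--     for direction in arr:
--         if stack and stack[-1] == opposite[direction]:
--             stack.pop()
--         else:
--             stack.append(direction)
--     return stack
-- ===== SOURCE B (Python) =====
-- def dir_reduc(arr):
--     opposite = {'NORTH': 'SOUTH', 'SOUTH': 'NORTH', 'EAST': 'WEST', 'WEST': 'EAST'}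
--     res = list(arr)
--     changed = True
--     while changed:
--         changed = False
--         for i in range(len(res) - 1):
--             if opposite[res[i + 1]] == res[i]:
--                 del res[i:i + 2]
--                 changed = True
--                 break
--     return res
-- ===== Notes on version B (the rewrite author's own statement) =====
-- stated objective: alternative
-- what changed: Replaces A's single left-to-right stack pass with a fixed-point rewriting: repeatedly delete the leftmost adjacent opposite pair and restart until no pair cancels; equality rests on confluence of the cancellation rewriting.
-- outside the precondition, e.g. on dir_reduc(['NORTH', 'X']): A raises KeyError, B raises KeyError; on dir_reduc(['X']): A returns ['X'], B returns ['X']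
import Mathlib
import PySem

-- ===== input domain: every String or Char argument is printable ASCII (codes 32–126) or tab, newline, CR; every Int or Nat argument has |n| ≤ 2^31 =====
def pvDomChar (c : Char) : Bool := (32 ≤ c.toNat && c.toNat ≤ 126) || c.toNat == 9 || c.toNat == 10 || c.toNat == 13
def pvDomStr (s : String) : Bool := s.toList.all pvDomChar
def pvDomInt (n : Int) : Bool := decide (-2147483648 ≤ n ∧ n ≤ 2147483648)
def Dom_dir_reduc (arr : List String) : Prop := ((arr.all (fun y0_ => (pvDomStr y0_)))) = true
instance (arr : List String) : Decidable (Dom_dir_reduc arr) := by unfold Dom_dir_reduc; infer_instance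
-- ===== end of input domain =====

-- B replaces A's one-pass stack reduction by a fixed-point rewriting (delete the leftmost
-- adjacent opposite pair, restart until none cancels); same results by confluence (objective: alternative).

-- ===== PORT A =====
def oppD : PySem.Dict String String :=
  PySem.Dict.ofList [("NORTH", "SOUTH"), ("SOUTH", "NORTH"), ("EAST", "WEST"), ("WEST", "EAST")]

-- one iteration of A's for-loop: `if stack and stack[-1] == opposite[direction]: pop else: append`.
-- Python raises KeyError when the stack is non-empty and the dict lookup misses; those inputs
-- are outside Pre_dir_reduc, so the `none` branch (exact only outside Pre_) is unconstrained.
def dirStep (stack : List String) (direction : String) : List String :=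
  match stack.getLast? with
  | none => stack ++ [direction]
  | some top =>
      match PySem.Dict.get? oppD direction with
      | some o => if top = o then stack.dropLast else stack ++ [direction]
      | none => stack ++ [direction]

def dir_reduc (arr : List String) : List String := arr.foldl dirStep []

-- ===== PORT B =====
-- scan for the first adjacent pair (res[i], res[i+1]) with opposite[res[i+1]] == res[i];
-- return the list with that pair deleted, or none if no pair cancels (the broken for-loop).
def findCancel : List String → Option (List String)
  | a :: b :: rest =>
      if PySem.Dict.get? oppD b = some a then some rest
      else (findCancel (b :: rest)).map (a :: ·)
  | _ => none

-- the while-loop: repeat until a full scan finds nothing; each deletion shortens the list,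
-- so `arr.length` steps of fuel always suffice.
def reduceLoop : Nat → List String → List String
  | 0, l => l
  | n + 1, l =>
      match findCancel l with
      | some l' => reduceLoop n l'
      | none => l

def dir_reduc_alt (arr : List String) : List String := reduceLoop arr.length arr

-- ===== PRECONDITION & SPEC =====
-- Pre_ restricts to the four compass directions (the task's natural domain): on lists with other
-- strings A raises KeyError whenever such a string is met while the stack is non-empty, and
-- returns only by accident of stack state otherwise.
def Pre_dir_reduc (arr : List String) : Prop :=
  ∀ s ∈ arr, s = "NORTH" ∨ s = "SOUTH" ∨ s = "EAST" ∨ s = "WEST"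
instance (arr : List String) : Decidable (Pre_dir_reduc arr) := by unfold Pre_dir_reduc; infer_instance

def pvWitness_dir_reduc : List String := ["NORTH", "SOUTH", "SOUTH", "EAST", "WEST", "NORTH", "WEST"]

def Spec_dir_reduc (arr : List String) (out : List String) : Prop := out = dir_reduc_alt arr
instance (arr : List String) (out : List String) : Decidable (Spec_dir_reduc arr out) := by unfold Spec_dir_reduc; infer_instance

-- ===== CLAIM (what is proved, stated in full; the proofs are below) =====
def Claim_equal_dir_reduc : Prop := ∀ (arr : List String), Dom_dir_reduc arr → Pre_dir_reduc arr → Spec_dir_reduc arr (dir_reduc arr)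

-- ===== LEMMAS AND PROOFS =====

-- total opposite function agreeing with the dict on valid directions
def opp (s : String) : String :=
  if s = "NORTH" then "SOUTH" else if s = "SOUTH" then "NORTH"
  else if s = "EAST" then "WEST" else if s = "WEST" then "EAST" else s

def ValidS (s : String) : Prop := s = "NORTH" ∨ s = "SOUTH" ∨ s = "EAST" ∨ s = "WEST"

theorem oppD_get {s : String} (h : ValidS s) : PySem.Dict.get? oppD s = some (opp s) := by
  rcases h with h | h | h | h <;> subst h <;> decide

theorem opp_opp {s : String} (h : ValidS s) : opp (opp s) = s := by
  rcases h with h | h | h | h <;> subst h <;> simp [opp]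

theorem opp_inj {a b : String} (ha : ValidS a) (h : opp a = b) : opp b = a := by
  rw [← h, opp_opp ha]

-- the reversed-stack step function (head = top of stack)
def g (r : List String) (d : String) : List String :=
  match r with
  | [] => [d]
  | t :: rest => if t = opp d then rest else d :: t :: rest

-- "no adjacent pair cancels": for every adjacency (a, b), opposite b ≠ a
def Red (l : List String) : Prop := l.IsChain (fun a b => opp b ≠ a)

def VS (l : List String) : Prop := ∀ x ∈ l, ValidS x

-- A's step is g on the reversed stack
theorem dirStep_eq_g (s : List String) {d : String} (hd : ValidS d) :
    dirStep s d = (g s.reverse d).reverse := by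
  cases hr : s.reverse with
  | nil =>
    have hs : s = [] := by simpa using congrArg List.reverse hr
    subst hs; simp [dirStep, g]
  | cons t rest =>
    have hs : s = rest.reverse ++ [t] := by
      have := congrArg List.reverse hr; simpa using this
    subst hs
    simp only [dirStep, List.getLast?_concat, oppD_get hd, g]
    split_ifs with h
    · simp
    · simp

theorem foldl_dirStep_eq_g (l : List String) (hl : VS l) (s : List String) :
    l.foldl dirStep s = (l.foldl g s.reverse).reverse := by
  induction l generalizing s with
  | nil => simp
  | cons a l ih =>
    have ha : ValidS a := hl a (by simp)
    have hl' : VS l := fun x hx => hl x (by simp [hx])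
    simp only [List.foldl_cons, dirStep_eq_g s ha]
    rw [ih hl' ((g s.reverse a).reverse), List.reverse_reverse]

-- one g-step preserves validity and reducedness of the stack
theorem g_inv {r : List String} {d : String} (hr : VS r) (hred : Red r) (hd : ValidS d) :
    VS (g r d) ∧ Red (g r d) := by
  cases r with
  | nil =>
    refine ⟨fun x hx => ?_, List.isChain_singleton d⟩
    simp [g] at hx; subst hx; exact hd
  | cons t rest =>
    by_cases h : t = opp d
    · refine ⟨fun x hx => hr x ?_, ?_⟩
      · simp [g, h] at hx; simp [hx]
      · simp only [g, if_pos h]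
        exact (List.isChain_cons.mp hred).2
    · constructor
      · intro x hx
        simp [g, h] at hx
        rcases hx with hx | hx | hx
        · subst hx; exact hd
        · exact hx ▸ hr t (by simp)
        · exact hr x (by simp [hx])
      · simp only [g, if_neg h]
        refine List.isChain_cons_cons.mpr ⟨?_, hred⟩
        intro hc
        exact h (by rw [← hc, opp_opp (hr t (by simp))])

theorem foldl_g_inv {l : List String} (hl : VS l) {r : List String} (hr : VS r) (hred : Red r) :
    VS (l.foldl g r) ∧ Red (l.foldl g r) := by
  induction l generalizing r with
  | nil => exact ⟨hr, hred⟩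
  | cons a l ih =>
    have ha : ValidS a := hl a (by simp)
    have hl' : VS l := fun x hx => hl x (by simp [hx])
    obtain ⟨h1, h2⟩ := g_inv hr hred ha
    simpa using ih hl' h1 h2

-- cancellation: pushing a then b with opp b = a returns the stack unchanged
theorem g_cancel {r : List String} {a b : String} (hr : VS r) (hred : Red r)
    (hb : ValidS b) (hab : opp b = a) : g (g r a) b = r := by
  have hba : opp a = b := opp_inj hb hab
  cases r with
  | nil => simp [g, hab.symm]
  | cons t rest =>
    by_cases h : t = opp a
    · simp only [g, if_pos h]
      cases rest with
      | nil => simp [h, hba]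
      | cons u rest2 =>
        have hadj : opp u ≠ t := (List.isChain_cons_cons.mp hred).1
        have hune : u ≠ a := by
          intro hu; exact hadj (by rw [hu, hba, ← h.symm, hba])
        have hnb : ¬ (u = opp b) := by rw [hab]; exact hune
        show (if u = opp b then rest2 else b :: u :: rest2) = t :: u :: rest2
        rw [if_neg hnb, h, hba]
    · simp only [g, if_neg h]
      simp [hab.symm]

-- deleting an adjacent cancelling pair does not change the fold result
theorem foldl_g_skip {u v : List String} {a b : String} (hu : VS u)
    (hb : ValidS b) (hab : opp b = a) {r : List String} (hr : VS r) (hred : Red r) :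
    (u ++ a :: b :: v).foldl g r = (u ++ v).foldl g r := by
  obtain ⟨h1, h2⟩ := foldl_g_inv hu hr hred
  simp only [List.foldl_append, List.foldl_cons]
  rw [g_cancel h1 h2 hb hab]

-- a reduced list folds to its own reverse
theorem foldl_g_red {l : List String} (hl : VS l) (hred : Red l) {r : List String}
    (hr : VS r) (hrred : Red r)
    (hcompat : ∀ a t, l.head? = some a → r.head? = some t → opp a ≠ t) :
    l.foldl g r = l.reverse ++ r := by
  induction l generalizing r with
  | nil => simp
  | cons a l ih =>
    have ha : ValidS a := hl a (by simp)
    have hl' : VS l := fun x hx => hl x (by simp [hx])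
    have hstep : g r a = a :: r := by
      cases r with
      | nil => simp [g]
      | cons t rest =>
        have hne : t ≠ opp a := fun hc => hcompat a t (by simp) (by simp) hc.symm
        simp [g, hne]
    rw [List.foldl_cons, hstep]
    have hr' : VS (a :: r) := by
      intro x hx; rcases List.mem_cons.mp hx with hx | hx
      · subst hx; exact ha
      · exact hr x hx
    have hrred' : Red (a :: r) := by
      refine List.isChain_cons.mpr ⟨?_, hrred⟩
      intro y hy
      cases r with
      | nil => simp at hy
      | cons t rest =>
        simp at hy; subst hy
        intro hc
        exact hcompat a t (by simp) (by simp) (opp_inj (hr t (by simp)) hc)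
    have hcompat' : ∀ x t, l.head? = some x → (a :: r).head? = some t → opp x ≠ t := by
      intro x t hx ht
      simp at ht; subst ht
      cases l with
      | nil => simp at hx
      | cons c l2 =>
        simp at hx; subst hx
        exact (List.isChain_cons_cons.mp hred).1
    rw [ih hl' (List.isChain_cons.mp hred).2 hr' hrred' hcompat']
    simp

-- findCancel = none means no adjacent pair cancels
theorem findCancel_none {l : List String} (hl : VS l) (h : findCancel l = none) : Red l := by
  induction l with
  | nil => exact List.isChain_nil
  | cons a l ih =>
    cases l with
    | nil => exact List.isChain_singleton a
    | cons b rest =>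
      have hb : ValidS b := hl b (by simp)
      simp only [findCancel] at h
      split_ifs at h with hc
      have hrec : findCancel (b :: rest) = none := by
          cases hfc : findCancel (b :: rest) with
          | none => rfl
          | some m => exact absurd (hfc ▸ h) (by simp)
      refine List.isChain_cons_cons.mpr ⟨?_, ih (fun x hx => hl x (by simp [hx])) hrec⟩
      intro hcc
      exact hc (by rw [oppD_get hb, hcc])

-- findCancel = some l' exhibits the deleted pair
theorem findCancel_some {l l' : List String} (hl : VS l) (h : findCancel l = some l') :
    ∃ u a b v, l = u ++ a :: b :: v ∧ l' = u ++ v ∧ opp b = a := by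
  induction l generalizing l' with
  | nil => simp [findCancel] at h
  | cons a l ih =>
    cases l with
    | nil => simp [findCancel] at h
    | cons b rest =>
      have hb : ValidS b := hl b (by simp)
      simp only [findCancel] at h
      split_ifs at h with hc
      · refine ⟨[], a, b, rest, by simp, by simpa using h.symm, ?_⟩
        rw [oppD_get hb] at hc
        exact Option.some.inj hc
      · cases hfc : findCancel (b :: rest) with
        | none => rw [hfc] at h; simp at h
        | some m =>
          rw [hfc] at h; simp at h
          obtain ⟨u, x, y, v, h1, h2, h3⟩ := ih (fun z hz => hl z (by simp [hz])) hfc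
          exact ⟨a :: u, x, y, v, by simp [h1], by simp [← h, h2], h3⟩

-- the while-loop: result folds to the same stack, is reduced and valid
theorem reduceLoop_main : ∀ (n : Nat) (l : List String), VS l → l.length ≤ 2 * n + 1 →
    (reduceLoop n l).foldl g [] = l.foldl g [] ∧ Red (reduceLoop n l) ∧ VS (reduceLoop n l) := by
  intro n
  induction n with
  | zero =>
    intro l hl hlen
    refine ⟨rfl, ?_, hl⟩
    match l, hlen with
    | [], _ => exact List.isChain_nil
    | [x], _ => exact List.isChain_singleton x
  | succ n ih =>
    intro l hl hlen
    cases hfc : findCancel l with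
    | none =>
      refine ⟨?_, ?_, ?_⟩ <;> simp only [reduceLoop, hfc]
      · exact findCancel_none hl hfc
      · exact hl
    | some l' =>
      obtain ⟨u, a, b, v, h1, h2, h3⟩ := findCancel_some hl hfc
      have hu : VS u := fun x hx => hl x (by simp [h1, hx])
      have hb : ValidS b := hl b (by simp [h1])
      have hl' : VS l' := by
        intro x hx
        rcases List.mem_append.mp (h2 ▸ hx) with hx | hx
        · exact hl x (by simp [h1, hx])
        · exact hl x (by simp [h1, hx])
      have hlen' : l'.length ≤ 2 * n + 1 := by
        have : l.length = l'.length + 2 := by simp [h1, h2]; omega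
        omega
      have heq : l'.foldl g [] = l.foldl g [] := by
        rw [h1, h2, foldl_g_skip hu hb h3 (by intro x hx; simp at hx) List.isChain_nil]
      obtain ⟨e1, e2, e3⟩ := ih l' hl' hlen'
      refine ⟨?_, ?_, ?_⟩ <;> simp only [reduceLoop, hfc]
      · rw [e1, heq]
      · exact e2
      · exact e3

-- ===== VERDICT (by name: the statement is the Claim_ definition above) =====
theorem dir_reduc_spec : Claim_equal_dir_reduc := by
  intro arr _ hpre
  unfold Spec_dir_reduc
  have hv : VS arr := hpre
  obtain ⟨e1, e2, e3⟩ := reduceLoop_main arr.length arr hv (by omega)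
  have hfix : (reduceLoop arr.length arr).foldl g [] = (reduceLoop arr.length arr).reverse := by
    rw [foldl_g_red e3 e2 (by intro x hx; simp at hx) List.isChain_nil
      (by intro a t _ ht; simp at ht)]
    simp
  have hA : dir_reduc arr = (arr.foldl g [].reverse).reverse :=
    foldl_dirStep_eq_g arr hv []
  rw [hA]
  simp only [List.reverse_nil]
  rw [← e1, hfix, List.reverse_reverse]
  rfl
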